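-- pv_equiv track=rewrite | github.com/abtuo/Sculpture3D | KinectOutputProcessing.py | color_array_to_rgb_matrix
-- ===== SOURCE A (Python) =====
-- def color_array_to_rgb_matrix(color_arr, width=1920, height=1080):
--     color_matrix = []
--     for h in range(height):
--         color_matrix += [[]]
--         for w in range(width):
--             color_matrix[h] += [[color_arr[(h*width + w) * 4],
--                                 color_arr[(h*width + w) * 4 + 1],
--                                 color_arr[(h*width + w) * 4 + 2]]]
--     return color_matrix
-- ===== SOURCE B (Python) =====
-- def color_array_to_rgb_matrix(color_arr, width=1920, height=1080):
--     # one linear pass building the flat pixel list, then regroup into rows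
--     if height <= 0:
--         return []
--     pixels = [[color_arr[i], color_arr[i + 1], color_arr[i + 2]]
--               for i in range(0, width * height * 4, 4)]
--     return [pixels[r * width:(r + 1) * width] for r in range(height)]
-- ===== Notes on version B (the rewrite author's own statement) =====
-- stated objective: simpler
-- what changed: A's nested loops with per-row index arithmetic are replaced by a flatten-then-regroup decomposition: one strided pass builds the flat pixel list, then rows are cut out of it by slicing.
import Mathlib
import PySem

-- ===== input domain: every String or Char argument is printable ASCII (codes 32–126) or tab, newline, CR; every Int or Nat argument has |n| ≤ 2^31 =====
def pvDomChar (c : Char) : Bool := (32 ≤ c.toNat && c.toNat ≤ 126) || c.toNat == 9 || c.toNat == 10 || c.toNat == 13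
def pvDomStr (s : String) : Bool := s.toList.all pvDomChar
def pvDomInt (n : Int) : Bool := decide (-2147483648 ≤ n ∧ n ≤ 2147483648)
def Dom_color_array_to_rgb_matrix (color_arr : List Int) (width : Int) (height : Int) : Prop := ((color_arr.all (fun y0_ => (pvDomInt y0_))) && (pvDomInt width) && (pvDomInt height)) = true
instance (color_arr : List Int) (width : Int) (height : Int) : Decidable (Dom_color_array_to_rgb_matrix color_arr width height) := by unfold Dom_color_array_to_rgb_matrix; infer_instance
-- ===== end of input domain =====

-- B replaces A's nested append loops by a flatten-then-regroup decomposition (one strided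
-- pass builds the flat pixel list, rows are then cut out by slicing); objective: simpler.


-- ===== PORT A =====
-- Python appends a fresh empty row, then extends color_matrix[h]; since row h is always the
-- just-appended last row, appending the completed row is the faithful transcription.
def color_array_to_rgb_matrix (color_arr : List Int) (width : Int) (height : Int) : List (List (List Int)) :=
  (PySem.List.pyRange 0 height 1).foldl (fun color_matrix h =>
    color_matrix ++ [(PySem.List.pyRange 0 width 1).foldl (fun row w =>
      row ++ [[PySem.List.pyGetD color_arr ((h * width + w) * 4) 0,
               PySem.List.pyGetD color_arr ((h * width + w) * 4 + 1) 0,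
               PySem.List.pyGetD color_arr ((h * width + w) * 4 + 2) 0]]) []]) []

-- ===== PORT B =====
def color_array_to_rgb_matrix_alt (color_arr : List Int) (width : Int) (height : Int) : List (List (List Int)) :=
  if height ≤ 0 then []
  else
    let pixels := (PySem.List.pyRange 0 (width * height * 4) 4).map (fun i =>
      [PySem.List.pyGetD color_arr i 0,
       PySem.List.pyGetD color_arr (i + 1) 0,
       PySem.List.pyGetD color_arr (i + 2) 0])
    (PySem.List.pyRange 0 height 1).map (fun r =>
      PySem.List.slice pixels (some (r * width)) (some ((r + 1) * width)))

-- ===== PRECONDITION & SPEC =====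
-- Pre_ excludes exactly the inputs where A raises IndexError: positive width and height with
-- color_arr shorter than the largest accessed index (h*width+w)*4+2 requires.
def Pre_color_array_to_rgb_matrix (color_arr : List Int) (width : Int) (height : Int) : Prop :=
  width ≤ 0 ∨ height ≤ 0 ∨ 4 * width * height - 1 ≤ (color_arr.length : Int)
instance (color_arr : List Int) (width : Int) (height : Int) : Decidable (Pre_color_array_to_rgb_matrix color_arr width height) := by unfold Pre_color_array_to_rgb_matrix; infer_instance

def pvWitness_color_array_to_rgb_matrix : List Int × Int × Int := ([10, 20, 30, 40, 50, 60, 70], 2, 1)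

def Spec_color_array_to_rgb_matrix (color_arr : List Int) (width : Int) (height : Int) (out : List (List (List Int))) : Prop := out = color_array_to_rgb_matrix_alt color_arr width height
instance (color_arr : List Int) (width : Int) (height : Int) (out : List (List (List Int))) : Decidable (Spec_color_array_to_rgb_matrix color_arr width height out) := by unfold Spec_color_array_to_rgb_matrix; infer_instance

-- ===== CLAIM (what is proved, stated in full; the proofs are below) =====
def Claim_equal_color_array_to_rgb_matrix : Prop := ∀ (color_arr : List Int) (width : Int) (height : Int), Dom_color_array_to_rgb_matrix color_arr width height → Pre_color_array_to_rgb_matrix color_arr width height → Spec_color_array_to_rgb_matrix color_arr width height (color_array_to_rgb_matrix color_arr width height)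

-- ===== LEMMAS AND PROOFS =====

theorem slice_nil {α : Type} (a b : Option Int) : PySem.List.slice ([] : List α) a b = [] := by
  cases a <;> cases b <;> simp [PySem.List.slice]

-- The two ports agree on every input (the Pre_ hypothesis is not needed for the value
-- equality: both ports read the same defaulted lookups at the same indices).
theorem key (c : List Int) (w h : Int) :
    color_array_to_rgb_matrix c w h = color_array_to_rgb_matrix_alt c w h := by
  unfold color_array_to_rgb_matrix color_array_to_rgb_matrix_alt
  rcases le_or_gt h 0 with hh | hh
  · simp [PySem.List.pyRange_one_eq_nil hh, hh]
  rw [if_neg (by omega)]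
  rcases le_or_gt w 0 with hw | hw
  · have hpix : PySem.List.pyRange 0 (w * h * 4) 4 = [] := by
      rw [PySem.List.pyRange_of_pos _ _ (by norm_num)]
      have : ¬ ((0:Int) < w * h * 4) := by nlinarith
      simp [this]
    simp [hpix, PySem.List.pyRange_one_eq_nil hw,
      slice_nil]
  · obtain ⟨W, rfl⟩ : ∃ W : Nat, w = (W : Int) := ⟨w.toNat, (Int.toNat_of_nonneg hw.le).symm⟩
    obtain ⟨H, rfl⟩ : ∃ H : Nat, h = (H : Int) := ⟨h.toNat, (Int.toNat_of_nonneg hh.le).symm⟩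
    have hW : 0 < W := by exact_mod_cast hw
    have hH : 0 < H := by exact_mod_cast hh
    have hcnt : PySem.List.pyRange 0 ((W : Int) * H * 4) 4 =
        (List.range (W * H)).map (fun k : Nat => (4 : Int) * (k : Int)) := by
      rw [PySem.List.pyRange_of_pos _ _ (by norm_num)]
      have h1 : (0:Int) < (W : Int) * H * 4 := by positivity
      rw [if_pos (by omega)]
      have h2 : ((W : Int) * H * 4 - 0 + 4 - 1) = 4 * ((W * H : Nat) : Int) + 3 := by
        push_cast; ring
      rw [h2]
      have h3 : ((4 * ((W * H : Nat) : Int) + 3) / 4).toNat = W * H := by omega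
      rw [h3]
      simp only [zero_add]
    rw [hcnt, PySem.List.pyRange_one, PySem.List.pyRange_one,
      PySem.List.foldl_append_singleton_eq_map]
    simp only [Int.sub_zero, Int.toNat_natCast, List.nil_append, List.map_map,
      PySem.List.foldl_append_singleton_eq_map, Function.comp_def, zero_add]
    apply List.map_congr_left
    intro hk hmem
    have hkH : hk < H := List.mem_range.mp hmem
    have e1 : ((hk : Int)) * (W : Int) = ((hk * W : Nat) : Int) := by push_cast; ring
    have e2 : ((hk : Int) + 1) * (W : Int) = ((hk * W : Nat) : Int) + ((W : Nat) : Int) := by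
      push_cast; ring
    rw [e1, e2, PySem.List.slice_natCast_add]
    have hlen : hk * W + W ≤ W * H := by
      calc hk * W + W = (hk + 1) * W := by ring
        _ ≤ H * W := Nat.mul_le_mul_right _ (Nat.succ_le_of_lt hkH)
        _ = W * H := Nat.mul_comm _ _
    apply List.ext_getElem
    · simp only [List.length_map, List.length_range, List.length_take, List.length_drop]
      omega
    · intro wk h1 h2
      simp only [List.getElem_map, List.getElem_range, List.getElem_take, List.getElem_drop]
      push_cast
      ring_nf

-- ===== VERDICT (by name: the statement is the Claim_ definition above) =====
theorem color_array_to_rgb_matrix_spec : Claim_equal_color_array_to_rgb_matrix := by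
  intro c w h _ _
  unfold Spec_color_array_to_rgb_matrix
  exact key c w h
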